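-- pv_equiv track=rewrite | github.com/ChazzCoin/HarkServer | harkExporter/PdfArticle.py | build_single_line
-- ===== SOURCE A (Python) =====
-- def build_single_line(body: str, i: int, forceLimit=0) -> (str, int):
--     """ -> return string with space at the end of first 125 - 140 characters <- """
--     count = len(body)
--     if i > count:
--         return body, i
--     prep = body[:i]
--     # if last character is empty
--     if forceLimit > 0:
--         if forceLimit <= i:
--             return prep, i
--     if prep[-1] == " " or prep[-1] == "." or prep[-1] == "," or prep[-1] == "\n":
--         # write to cell
--         return prep,  i
--     # go forward one more.
--     i += 1
--     return build_single_line(body, i)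
-- ===== SOURCE B (Python) =====
-- def build_single_line(body: str, i: int, forceLimit=0) -> (str, int):
--     """Iterative forward scan for the next break character; the forceLimit
--     cutoff is hoisted out of the loop since it can only apply on entry."""
--     count = len(body)
--     if forceLimit > 0 and forceLimit <= i <= count:
--         return body[:i], i
--     while i <= count:
--         prep = body[:i]
--         c = prep[-1]
--         if c in " .,\n":
--             return prep, i
--         i += 1
--     return body, i
-- ===== Notes on version B (the rewrite author's own statement) =====
-- stated objective: simpler
-- what changed: Replaced A's tail recursion (which re-slices and rebuilds the call each step and threads forceLimit only to drop it) by one hoisted forceLimit check plus a plain iterative while-loop that scans forward for a break character.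
import Mathlib
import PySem

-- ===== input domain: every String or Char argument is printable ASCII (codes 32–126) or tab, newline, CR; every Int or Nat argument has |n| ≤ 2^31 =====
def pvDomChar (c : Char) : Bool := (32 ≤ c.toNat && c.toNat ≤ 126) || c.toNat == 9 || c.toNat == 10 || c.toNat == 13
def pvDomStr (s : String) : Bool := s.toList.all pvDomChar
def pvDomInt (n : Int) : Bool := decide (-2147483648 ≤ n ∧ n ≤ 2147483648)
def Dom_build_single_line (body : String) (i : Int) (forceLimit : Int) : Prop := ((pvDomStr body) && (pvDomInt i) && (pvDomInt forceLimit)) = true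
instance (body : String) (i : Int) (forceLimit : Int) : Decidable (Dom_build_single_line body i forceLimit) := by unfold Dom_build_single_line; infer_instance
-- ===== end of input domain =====

-- B replaces A's tail recursion (which re-slices and re-checks the forceLimit guard shape each call)
-- by a single hoisted forceLimit check plus an iterative while-loop scan; objective: simpler.

-- ===== PORT A =====
def build_single_line (body : String) (i : Int) (forceLimit : Int) : String × Int :=
  if i > (PySem.Str.len body : Int) then (body, i)
  else
    let prep := PySem.Str.slice body none (some i)
    if forceLimit > 0 ∧ forceLimit ≤ i then (prep, i)
    else
      match PySem.Str.pyGet? prep (-1) with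
      | none => ("", 0)  -- IndexError in Python; unreachable inside Pre_
      | some c =>
        if c = ' ' ∨ c = '.' ∨ c = ',' ∨ c = '\n' then (prep, i)
        else build_single_line body (i + 1) 0
termination_by ((PySem.Str.len body : Int) + 1 - i).toNat
decreasing_by omega

-- ===== PORT B =====
-- the while-loop of Source B
def bslScan (body : String) (count : Int) (i : Int) : String × Int :=
  if i ≤ count then
    let prep := PySem.Str.slice body none (some i)
    match PySem.Str.pyGet? prep (-1) with
    | none => ("", 0)  -- IndexError in Python; unreachable inside Pre_
    | some c =>
      if ([' ', '.', ',', '\n'].contains c) then (prep, i)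
      else bslScan body count (i + 1)
  else (body, i)
termination_by (count + 1 - i).toNat
decreasing_by omega

def build_single_line_alt (body : String) (i : Int) (forceLimit : Int) : String × Int :=
  let count : Int := (PySem.Str.len body : Int)
  if forceLimit > 0 ∧ forceLimit ≤ i ∧ i ≤ count then (PySem.Str.slice body none (some i), i)
  else bslScan body count i

-- ===== PRECONDITION & SPEC =====
-- Pre_ excludes exactly the inputs on which Python A raises IndexError (prep[-1] on an empty
-- slice, reached when i ≤ 0 and no break character is met before the slice becomes empty).
def Pre_build_single_line (body : String) (i : Int) (forceLimit : Int) : Prop :=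
  1 ≤ i ∨
  (-(body.toList.length : Int) < i ∧
    ∃ k ∈ Finset.range body.toList.length,
      (k : Int) + 2 ≤ body.toList.length ∧
      (body.toList.length : Int) + i - 1 ≤ k ∧
      body.toList.getD k 'x' ∈ [' ', '.', ',', '\n'])
instance (body : String) (i : Int) (forceLimit : Int) : Decidable (Pre_build_single_line body i forceLimit) := by unfold Pre_build_single_line; infer_instance

def pvWitness_build_single_line : String × Int × Int := ("ab cd", 2, 0)

def Spec_build_single_line (body : String) (i : Int) (forceLimit : Int) (out : String × Int) : Prop := out = build_single_line_alt body i forceLimit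
instance (body : String) (i : Int) (forceLimit : Int) (out : String × Int) : Decidable (Spec_build_single_line body i forceLimit out) := by unfold Spec_build_single_line; infer_instance

-- ===== CLAIM (what is proved, stated in full; the proofs are below) =====
def Claim_equal_build_single_line : Prop := ∀ (body : String) (i : Int) (forceLimit : Int), Dom_build_single_line body i forceLimit → Pre_build_single_line body i forceLimit → Spec_build_single_line body i forceLimit (build_single_line body i forceLimit)

-- ===== LEMMAS AND PROOFS =====

theorem contains_breaks_iff (c : Char) :
    ([' ', '.', ',', '\n'].contains c) = true ↔ (c = ' ' ∨ c = '.' ∨ c = ',' ∨ c = '\n') := by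
  simp [List.contains_eq_mem]

-- the loop of B computes exactly A's recursion with forceLimit = 0
theorem bslScan_eq_A (body : String) (i : Int) :
    bslScan body (PySem.Str.len body : Int) i = build_single_line body i 0 := by
  rw [bslScan, build_single_line]
  by_cases h : i ≤ (PySem.Str.len body : Int)
  · simp only [h, if_true, show ¬ (i > (PySem.Str.len body : Int)) by omega, if_false]
    simp only [show ¬ ((0:Int) > 0 ∧ (0:Int) ≤ i) by omega, if_false]
    cases hg : PySem.Str.pyGet? (PySem.Str.slice body none (some i)) (-1) with
    | none => rfl
    | some c =>
      by_cases hc : c = ' ' ∨ c = '.' ∨ c = ',' ∨ c = '\n'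
      · simp only [hc, if_true, (contains_breaks_iff c).mpr hc, if_true]
      · have : ([' ', '.', ',', '\n'].contains c) ≠ true := fun hh => hc ((contains_breaks_iff c).mp hh)
        simp only [hc, if_false, Bool.not_eq_true] at *
        simp only [this]
        exact bslScan_eq_A body (i + 1)
  · simp only [h, if_false, show i > (PySem.Str.len body : Int) by omega, if_true]
termination_by ((PySem.Str.len body : Int) + 1 - i).toNat
decreasing_by omega

-- the two ports agree on every input (the IndexError branches return the same default)
theorem A_eq_B (body : String) (i : Int) (forceLimit : Int) :
    build_single_line body i forceLimit = build_single_line_alt body i forceLimit := by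
  rw [build_single_line, build_single_line_alt]
  by_cases h : i > (PySem.Str.len body : Int)
  · rw [if_pos h, if_neg (show ¬ (forceLimit > 0 ∧ forceLimit ≤ i ∧ i ≤ (PySem.Str.len body : Int)) by omega)]
    rw [bslScan]
    simp only [show ¬ (i ≤ (PySem.Str.len body : Int)) by omega, if_false]
  · by_cases hg : forceLimit > 0 ∧ forceLimit ≤ i
    · rw [if_neg h, if_pos hg, if_pos (show forceLimit > 0 ∧ forceLimit ≤ i ∧ i ≤ (PySem.Str.len body : Int) by omega)]
    · rw [if_neg h, if_neg hg, if_neg (show ¬ (forceLimit > 0 ∧ forceLimit ≤ i ∧ i ≤ (PySem.Str.len body : Int)) by tauto)]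
      rw [bslScan]
      simp only [show i ≤ (PySem.Str.len body : Int) by omega, if_true]
      cases hgc : PySem.Str.pyGet? (PySem.Str.slice body none (some i)) (-1) with
      | none => rfl
      | some c =>
        by_cases hc : c = ' ' ∨ c = '.' ∨ c = ',' ∨ c = '\n'
        · simp only [hc, if_true, (contains_breaks_iff c).mpr hc, if_true]
        · have hcc : ([' ', '.', ',', '\n'].contains c) ≠ true := fun hh => hc ((contains_breaks_iff c).mp hh)
          simp only [Bool.not_eq_true] at hcc
          simp only [hc, if_false, hcc, if_false]
          exact (bslScan_eq_A body (i + 1)).symm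

-- ===== VERDICT (by name: the statement is the Claim_ definition above) =====
theorem build_single_line_spec : Claim_equal_build_single_line := by
  intro body i forceLimit _ _
  unfold Spec_build_single_line
  exact A_eq_B body i forceLimit
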